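-- pv_equiv track=rewrite | github.com/prhancock/squaredle | squaredleGrid.py | _validateDictionaryList
-- ===== SOURCE A (Python) =====
-- def _validateDictionaryList(dictionary):
--     # make sure it's a list or decendent of type list
--     if not isinstance(dictionary,list):
--          raise ValueError("dictionary not type 'list'")
--
--     # Make sure the dictionary isn't an empty list
--     if len(dictionary) == 0:
--         raise ValueError("empty dictionary")
--
--     # make dictionary uppercase
--     dictionary = [x.upper() for x in dictionary]
--
--     # make sure the dictionary is sorted in ascending order
--     if not all(dictionary[i] <= dictionary[i + 1] for i in range(len(dictionary) - 1)):
--         raise ValueError("dictionary not sorted")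
--
--     return dictionary
-- ===== SOURCE B (Python) =====
-- def _validateDictionaryList(dictionary):
--     if not isinstance(dictionary, list):
--         raise ValueError("dictionary not type 'list'")
--     if len(dictionary) == 0:
--         raise ValueError("empty dictionary")
--     dictionary = [x.upper() for x in dictionary]
--     # sort-and-compare instead of a pairwise scan
--     if dictionary != sorted(dictionary):
--         raise ValueError("dictionary not sorted")
--     return dictionary
-- ===== Notes on version B (the rewrite author's own statement) =====
-- stated objective: idiomatic
-- what changed: The pairwise index-based all(dictionary[i] <= dictionary[i+1]) sortedness scan is replaced by building sorted(dictionary) and comparing it to the list, a sort-and-compare check.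
import Mathlib
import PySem

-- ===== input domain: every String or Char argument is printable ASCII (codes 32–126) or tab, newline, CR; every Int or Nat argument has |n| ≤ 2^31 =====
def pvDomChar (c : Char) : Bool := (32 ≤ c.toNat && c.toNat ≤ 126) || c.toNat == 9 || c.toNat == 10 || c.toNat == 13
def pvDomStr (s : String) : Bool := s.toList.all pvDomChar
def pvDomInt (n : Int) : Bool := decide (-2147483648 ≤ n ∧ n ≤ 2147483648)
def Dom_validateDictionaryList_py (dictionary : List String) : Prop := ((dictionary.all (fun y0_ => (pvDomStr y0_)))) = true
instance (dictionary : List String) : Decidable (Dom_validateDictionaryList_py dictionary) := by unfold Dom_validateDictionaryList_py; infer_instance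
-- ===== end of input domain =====

-- B replaces A's pairwise index scan with an idiomatic sort-and-compare sortedness check; same guards, same order.
-- Pre_ excludes exactly the inputs on which the Python A raises ValueError (empty list, or uppercased list not ascending);
-- both ports return [] there, but nothing is claimed.

-- ===== PORT A =====
def validateDictionaryList_py (dictionary : List String) : List String :=
  -- isinstance(dictionary, list) is always true under the type convention
  if PySem.List.len dictionary = 0 then []   -- raise ValueError("empty dictionary")
  else
    let d := dictionary.map PySem.Str.upper
    if (PySem.List.pyRange 0 (PySem.List.len d - 1) 1).all
        (fun i => decide (PySem.List.pyGetD d i "" ≤ PySem.List.pyGetD d (i + 1) "")) then d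
    else []   -- raise ValueError("dictionary not sorted")

-- ===== PORT B =====
def validateDictionaryList_py_alt (dictionary : List String) : List String :=
  if PySem.List.len dictionary = 0 then []   -- raise ValueError("empty dictionary")
  else
    let d := dictionary.map PySem.Str.upper
    if d ≠ PySem.List.sorted d (fun x => x) false then []   -- raise ValueError("dictionary not sorted")
    else d

-- ===== PRECONDITION & SPEC =====
-- Pre_ = the inputs on which Python A returns normally: non-empty list whose uppercased entries are ascending.
def Pre_validateDictionaryList_py (dictionary : List String) : Prop :=
  dictionary ≠ [] ∧ (dictionary.map (fun s => (PySem.Str.upper s).toList)).Pairwise (· ≤ ·)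
instance (dictionary : List String) : Decidable (Pre_validateDictionaryList_py dictionary) := by
  unfold Pre_validateDictionaryList_py; infer_instance
def pvWitness_validateDictionaryList_py : List String := ["apple", "Box", "cat"]
def Spec_validateDictionaryList_py (dictionary : List String) (out : List String) : Prop := out = validateDictionaryList_py_alt dictionary
instance (dictionary : List String) (out : List String) : Decidable (Spec_validateDictionaryList_py dictionary out) := by unfold Spec_validateDictionaryList_py; infer_instance

-- ===== CLAIM (what is proved, stated in full; the proofs are below) =====
def Claim_equal_validateDictionaryList_py : Prop := ∀ (dictionary : List String), Dom_validateDictionaryList_py dictionary → Pre_validateDictionaryList_py dictionary → Spec_validateDictionaryList_py dictionary (validateDictionaryList_py dictionary)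

-- ===== LEMMAS AND PROOFS =====

theorem pairwise_all_pyRange (d : List String) (hp : d.Pairwise (· ≤ ·)) :
    (PySem.List.pyRange 0 (PySem.List.len d - 1) 1).all
      (fun i => decide (PySem.List.pyGetD d i "" ≤ PySem.List.pyGetD d (i + 1) "")) = true := by
  rw [List.all_eq_true]
  intro i hi
  rw [PySem.List.mem_pyRange_one] at hi
  obtain ⟨h0, h1⟩ := hi
  simp only [PySem.List.len_eq] at h1
  rw [PySem.List.pyGetD_eq_getElem d "" h0 (by omega),
      PySem.List.pyGetD_eq_getElem d "" (show (0:ℤ) ≤ i + 1 by omega) (by omega)]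
  simp only [decide_eq_true_iff]
  have := List.pairwise_iff_getElem.mp hp i.toNat ((i + 1).toNat)
    (by omega) (by omega) (by omega)
  exact this

-- ===== VERDICT (by name: the statement is the Claim_ definition above) =====
theorem validateDictionaryList_py_spec : Claim_equal_validateDictionaryList_py := by
  intro dictionary _ ⟨hne, hp0⟩
  have hp : (dictionary.map PySem.Str.upper).Pairwise (· ≤ ·) := by
    rw [List.pairwise_map] at hp0 ⊢
    exact hp0.imp (fun h => String.le_iff_toList_le.mpr h)
  have hlen : ¬ (PySem.List.len dictionary = 0) := by
    simp only [PySem.List.len_eq]; simpa using hne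
  have hA : validateDictionaryList_py dictionary = dictionary.map PySem.Str.upper := by
    unfold validateDictionaryList_py
    rw [if_neg hlen, if_pos (pairwise_all_pyRange _ hp)]
  have hB : validateDictionaryList_py_alt dictionary = dictionary.map PySem.Str.upper := by
    unfold validateDictionaryList_py_alt
    rw [if_neg hlen, if_neg (by
      simp only [ne_eq, not_not]
      exact (PySem.List.sorted_eq_self_of_pairwise _ _ hp).symm)]
  unfold Spec_validateDictionaryList_py
  rw [hA, hB]
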